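-- pv_equiv track=rewrite | github.com/taylor-swift-13/source2fsm | source2fsm/ir2Source.py | remove_useless_char
-- ===== SOURCE A (Python) =====
-- def remove_useless_char(lines):
--     updated_lines=[]
--     remove_chars = ['{', '}', '\n']
--     for line in lines:
--         for char in remove_chars:
--             line = line.replace(char, '')
--         updated_lines.append(line)
--     return updated_lines
-- ===== SOURCE B (Python) =====
-- def remove_useless_char(lines):
--     bad = {'{', '}', '\n'}
--     return [''.join(c for c in line if c not in bad) for line in lines]
-- ===== Notes on version B (the rewrite author's own statement) =====
-- stated objective: simpler
-- what changed: Each line is cleaned in a single character-filtering pass against a set of the three removed characters, instead of three sequential full-string .replace scans accumulated in an explicit loop.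
import Mathlib
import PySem

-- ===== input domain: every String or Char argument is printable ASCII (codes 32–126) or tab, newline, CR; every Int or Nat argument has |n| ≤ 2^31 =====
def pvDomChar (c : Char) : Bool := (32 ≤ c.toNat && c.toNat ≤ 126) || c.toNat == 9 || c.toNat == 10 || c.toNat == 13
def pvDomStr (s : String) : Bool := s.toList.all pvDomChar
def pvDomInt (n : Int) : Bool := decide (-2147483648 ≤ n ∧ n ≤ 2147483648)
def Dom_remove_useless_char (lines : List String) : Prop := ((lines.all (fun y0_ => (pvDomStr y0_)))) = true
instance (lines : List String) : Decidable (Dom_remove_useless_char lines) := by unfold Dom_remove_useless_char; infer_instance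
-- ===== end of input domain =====

-- B cleans each line in one character-filtering pass instead of A's three sequential .replace scans (objective: simpler).

-- ===== PORT A =====
def remove_useless_char (lines : List String) : List String :=
  let remove_chars : List String := ["{", "}", "\n"]
  lines.foldl (fun updated_lines line =>
    let line := remove_chars.foldl (fun line char => PySem.Str.replace line char "") line
    updated_lines ++ [line]) []

-- ===== PORT B =====
def remove_useless_char_alt (lines : List String) : List String :=
  lines.map (fun line =>
    String.ofList (line.toList.filter (fun c => !(['{', '}', '\n'].contains c))))

-- ===== PRECONDITION & SPEC =====
def Spec_remove_useless_char (lines : List String) (out : List String) : Prop := out = remove_useless_char_alt lines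
instance (lines : List String) (out : List String) : Decidable (Spec_remove_useless_char lines out) := by unfold Spec_remove_useless_char; infer_instance

-- ===== CLAIM (what is proved, stated in full; the proofs are below) =====
def Claim_equal_remove_useless_char : Prop := ∀ (lines : List String), Dom_remove_useless_char lines → Spec_remove_useless_char lines (remove_useless_char lines)

-- ===== LEMMAS AND PROOFS =====

-- replace.go with a one-character pattern and empty replacement filters that character out
theorem replace_go_single (c : Char) (fuel : Nat) :
    ∀ (l acc : List Char), l.length ≤ fuel →
      PySem.Chars.replace.go [c] [] fuel l acc = acc.reverse ++ l.filter (fun x => x ≠ c) := by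
  induction fuel with
  | zero =>
    intro l acc h
    match l with
    | [] => simp [PySem.Chars.replace.go]
    | x :: t => simp at h
  | succ n ih =>
    intro l acc h
    match l with
    | [] => simp [PySem.Chars.replace.go]
    | x :: t =>
      simp only [List.length_cons, Nat.succ_le_succ_iff] at h
      rw [PySem.Chars.replace.go]
      by_cases hx : x = c
      · subst hx
        simp only [List.isPrefixOf, BEq.rfl, Bool.and_self, if_pos, List.length_cons]
        rw [show List.drop ([].length + 1) (x :: t) = t by simp]
        rw [ih t _ h]
        simp [List.filter]
      · have hpf : ([c].isPrefixOf (x :: t)) = false := by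
          simp [List.isPrefixOf]
          exact fun hxc => (hx hxc.symm).elim
        rw [hpf]
        simp only [Bool.false_eq_true, if_false]
        rw [ih t (x :: acc) h]
        simp [List.filter, hx]

-- Python s.replace(single-char, '') is a filter
theorem replace_single (c : Char) (s : List Char) :
    PySem.Chars.replace s [c] [] = s.filter (fun x => x ≠ c) := by
  rw [PySem.Chars.replace]
  simp only [List.isEmpty_cons, Bool.false_eq_true, if_false]
  simpa using replace_go_single c s.length s [] (le_refl _)

-- A's accumulate-by-append loop is a map
theorem foldl_append_map {α β : Type} (g : α → β) (xs : List α) :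
    ∀ acc : List β, xs.foldl (fun u l => u ++ [g l]) acc = acc ++ xs.map g := by
  induction xs with
  | nil => intro acc; simp
  | cons x t ih => intro acc; simp [List.foldl, ih]

theorem str_replace_single (s : String) (c : String) (c' : Char) (hc : c.toList = [c']) :
    (PySem.Str.replace s c "").toList = s.toList.filter (fun x => x ≠ c') := by
  rw [PySem.Str.toList_replace, hc, show ("" : String).toList = [] from rfl]
  exact replace_single c' s.toList

-- the three-replace chain on one line equals B's single filter
theorem line_clean (line : String) :
    PySem.Str.replace (PySem.Str.replace (PySem.Str.replace line "{" "") "}" "") "\n" "" =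
      String.ofList (line.toList.filter (fun c => !(['{', '}', '\n'].contains c))) := by
  apply String.toList_inj.mp
  rw [str_replace_single _ "\n" '\n' (by decide),
      str_replace_single _ "}" '}' (by decide),
      str_replace_single _ "{" '{' (by decide)]
  rw [String.toList_ofList]
  rw [List.filter_filter, List.filter_filter]
  apply List.filter_congr
  intro x _
  by_cases h1 : x = '{' <;> by_cases h2 : x = '}' <;> by_cases h3 : x = '\n' <;>
    simp [h1, h2, h3]

-- ===== VERDICT (by name: the statement is the Claim_ definition above) =====
theorem remove_useless_char_spec : Claim_equal_remove_useless_char := by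
  intro lines _
  unfold Spec_remove_useless_char remove_useless_char remove_useless_char_alt
  rw [foldl_append_map]
  simp only [List.nil_append]
  apply List.map_congr_left
  intro line _
  simp only [List.foldl]
  exact line_clean line
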